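-- pv_equiv track=rewrite | github.com/Zikx/Algorithm | Programmers/bruteforce/모의고사.py | solution
-- ===== SOURCE A (Python) =====
-- def solution(answers):
--     re_answer = list()
--     answer = [0,0,0]
--     answer_len = len(answers)
--     num1 = [1,2,3,4,5]
--     num2 = [2,1,2,3,2,4,2,5]
--     num3 = [3,3,1,1,2,2,4,4,5,5]
--
--     for i in range(answer_len):
--         if num1[i % (len(num1))] == answers[i]:
--             answer[0] += 1
--         if num2[i % (len(num2))] == answers[i]:
--             answer[1] += 1
--         if num3[i % (len(num3))] == answers[i]:
--             answer[2] += 1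
--
--     max_answers = max(answer)
--
--     for i in range(len(answer)):
--         if max_answers == answer[i]:
--             re_answer.append(i+1)
--
--     re_answer.sort()
--     return re_answer
-- ===== SOURCE B (Python) =====
-- def solution(answers):
--     patterns = [[1, 2, 3, 4, 5],
--                 [2, 1, 2, 3, 2, 4, 2, 5],
--                 [3, 3, 1, 1, 2, 2, 4, 4, 5, 5]]
--     # Every pattern repeats with a period dividing 40 = lcm(5, 8, 10), so a
--     # position i only matters through (i % 40, answers[i]).  Tally those pairs
--     # once into a dict; each score is then 40 lookups, no rescan of answers.
--     cnt = {}
--     for i, a in enumerate(answers):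
--         key = (i % 40, a)
--         cnt[key] = cnt.get(key, 0) + 1
--     scores = [sum(cnt.get((r, p[r % len(p)]), 0) for r in range(40))
--               for p in patterns]
--     best = max(scores)
--     return [k + 1 for k, s in enumerate(scores) if s == best]
-- ===== Notes on version B (the rewrite author's own statement) =====
-- stated objective: alternative
-- what changed: Instead of A's per-index loop testing each pattern position (three counters updated while scanning answers), B tallies (index mod 40, answer) pairs into a dict in one pass -- 40 = lcm of the pattern periods, so that pair determines every match -- and then computes each pattern's score by 40 dict lookups; max indices are selected by a comprehension with no sort.
import Mathlib
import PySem

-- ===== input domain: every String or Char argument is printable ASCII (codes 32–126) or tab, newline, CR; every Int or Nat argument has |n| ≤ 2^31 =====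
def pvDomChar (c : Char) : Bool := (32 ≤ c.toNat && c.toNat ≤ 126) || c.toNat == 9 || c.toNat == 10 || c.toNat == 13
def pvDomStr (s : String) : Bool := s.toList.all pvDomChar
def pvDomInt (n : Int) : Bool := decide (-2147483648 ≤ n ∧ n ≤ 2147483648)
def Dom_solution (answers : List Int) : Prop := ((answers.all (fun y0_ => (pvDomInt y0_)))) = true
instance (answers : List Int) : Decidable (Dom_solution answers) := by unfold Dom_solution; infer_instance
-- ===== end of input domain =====

-- B replaces A's per-index three-counter scan by a one-pass tally of
-- (index mod 40, answer) pairs into a dict (40 = lcm of the pattern periods),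
-- from which each pattern's score is read off by 40 lookups; objective: alternative.

-- ===== PORT A =====
def solution (answers : List Int) : List Int :=
  let num1 : List Int := [1, 2, 3, 4, 5]
  let num2 : List Int := [2, 1, 2, 3, 2, 4, 2, 5]
  let num3 : List Int := [3, 3, 1, 1, 2, 2, 4, 4, 5, 5]
  -- answer = [0,0,0], updated by three independent ifs per index (a triple of counters)
  let answer : Int × Int × Int :=
    (PySem.List.pyRange 0 answers.length 1).foldl
      (fun a i =>
        ((if PySem.List.pyGetD num1 (PySem.Int.mod i (num1.length : Int)) 0 == PySem.List.pyGetD answers i 0 then a.1 + 1 else a.1),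
         (if PySem.List.pyGetD num2 (PySem.Int.mod i (num2.length : Int)) 0 == PySem.List.pyGetD answers i 0 then a.2.1 + 1 else a.2.1),
         (if PySem.List.pyGetD num3 (PySem.Int.mod i (num3.length : Int)) 0 == PySem.List.pyGetD answers i 0 then a.2.2 + 1 else a.2.2)))
      (0, 0, 0)
  let answerL : List Int := [answer.1, answer.2.1, answer.2.2]
  let max_answers : Int := (PySem.List.max? answerL (fun y => y)).getD 0
  let re_answer : List Int :=
    (PySem.List.pyRange 0 (answerL.length : Int) 1).foldl
      (fun re i => if max_answers == PySem.List.pyGetD answerL i 0 then re ++ [i + 1] else re) []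
  PySem.List.sorted re_answer id false

-- ===== PORT B =====
-- B's per-pattern score: 40 dict lookups, one per residue class mod 40
def pvScore (cnt : PySem.Dict (Int × Int) Int) (p : List Int) : Int :=
  ((PySem.List.pyRange 0 40 1).map
    (fun r => cnt.getD (r, PySem.List.pyGetD p (PySem.Int.mod r (p.length : Int)) 0) 0)).sum

def solution_alt (answers : List Int) : List Int :=
  let patterns : List (List Int) :=
    [[1, 2, 3, 4, 5], [2, 1, 2, 3, 2, 4, 2, 5], [3, 3, 1, 1, 2, 2, 4, 4, 5, 5]]
  -- cnt[key] = cnt.get(key, 0) + 1 over enumerate(answers), key = (i % 40, a)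
  let cnt : PySem.Dict (Int × Int) Int :=
    (PySem.List.enumerate answers 0).foldl
      (fun d ia => d.insert (PySem.Int.mod ia.1 40, ia.2)
                            (d.getD (PySem.Int.mod ia.1 40, ia.2) 0 + 1))
      PySem.Dict.empty
  let scores : List Int := patterns.map (fun p => pvScore cnt p)
  let best : Int := (PySem.List.max? scores (fun y => y)).getD 0
  ((PySem.List.enumerate scores 0).filter (fun s => s.2 == best)).map (fun s => s.1 + 1)

-- ===== PRECONDITION & SPEC =====
def Spec_solution (answers : List Int) (out : List Int) : Prop := out = solution_alt answers
instance (answers : List Int) (out : List Int) : Decidable (Spec_solution answers out) := by unfold Spec_solution; infer_instance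

-- ===== CLAIM (what is proved, stated in full; the proofs are below) =====
def Claim_equal_solution : Prop := ∀ (answers : List Int), Dom_solution answers → Spec_solution answers (solution answers)

-- ===== LEMMAS AND PROOFS =====

-- == is symmetric for a lawful BEq (used to align A's and B's comparison order)
theorem pv_beq_comm {α : Type} [BEq α] [LawfulBEq α] (a b : α) : (a == b) = (b == a) := by
  by_cases h : a = b
  · simp [h]
  · have h' : ¬ b = a := fun hx => h hx.symm
    simp [h, h']

-- the residues 0..39 hit a fixed pair (j, a) with 0 ≤ j < 40 exactly when a = f j
theorem pv_ind (f : Int → Int) (x : Int × Int) (hx0 : 0 ≤ x.1) (hx40 : x.1 < 40) :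
    ((PySem.List.pyRange 0 40 1).map (fun r => if ((r, f r) == x) then (1:Int) else 0)).sum
      = if x.2 == f x.1 then 1 else 0 := by
  rw [PySem.List.sum_map_ite_one_zero]
  by_cases hfa : f x.1 = x.2
  · have hc : (PySem.List.pyRange 0 40 1).countP (fun r => (r, f r) == x)
        = List.count x.1 (PySem.List.pyRange 0 40 1) := by
      rw [List.count_eq_countP]
      apply List.countP_congr
      intro r _
      constructor
      · intro h; exact beq_iff_eq.mpr (Prod.ext_iff.mp (eq_of_beq h)).1
      · intro h; have : r = x.1 := by simpa using h
        subst this; exact beq_iff_eq.mpr (Prod.ext_iff.mpr ⟨rfl, hfa⟩)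
    rw [hc, List.count_eq_one_of_mem (PySem.List.nodup_pyRange_one 0 40)
      ((PySem.List.mem_pyRange_one).mpr ⟨hx0, hx40⟩)]
    simp [hfa]
  · have hc : (PySem.List.pyRange 0 40 1).countP (fun r => (r, f r) == x) = 0 := by
      rw [List.countP_eq_zero]
      intro r _ h
      have := Prod.ext_iff.mp (eq_of_beq h)
      exact hfa (by rw [← this.1]; exact this.2)
    rw [hc]
    have hne : ¬ (x.2 == f x.1) = true := by
      simp; intro h; exact hfa h.symm
    simp [hne]

-- summing the counts of (r, f r) over r = 0..39 counts the elements matching their own residue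
theorem pv_sum_count (f : Int → Int) (L : List (Int × Int))
    (h : ∀ x ∈ L, 0 ≤ x.1 ∧ x.1 < 40) :
    ((PySem.List.pyRange 0 40 1).map (fun r => ((List.count (r, f r) L : Nat) : Int))).sum
      = (L.countP (fun x => x.2 == f x.1) : Int) := by
  induction L with
  | nil => simp
  | cons x T ih =>
    have hx := h x (List.mem_cons_self)
    have hT := ih (fun y hy => h y (List.mem_cons_of_mem _ hy))
    have hcc : ∀ r : Int, ((List.count (r, f r) (x :: T) : Nat) : Int)
        = ((List.count (r, f r) T : Nat) : Int) + (if ((r, f r) == x) then (1:Int) else 0) := by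
      intro r; rw [List.count_cons, pv_beq_comm]; push_cast; ring
    simp only [hcc]
    rw [PySem.List.sum_map_add_int, hT, pv_ind f x hx.1 hx.2, List.countP_cons]
    push_cast; ring

-- i % 40 % L = i % L when L divides 40 and is positive (pattern periods 5, 8, 10)
theorem pv_mod_mod (i L : Int) (hL : 0 < L) (hd : L ∣ 40) :
    PySem.Int.mod (PySem.Int.mod i 40) L = PySem.Int.mod i L := by
  rw [PySem.Int.mod_eq_emod_of_pos (by omega : (0:Int) < 40),
      PySem.Int.mod_eq_emod_of_pos hL, PySem.Int.mod_eq_emod_of_pos hL]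
  exact Int.emod_emod_of_dvd i hd

-- B's dict-lookup score for a pattern p equals the direct count of matching positions
theorem pv_score_eq (answers p : List Int) (hL : 0 < p.length)
    (hd : ((p.length : Nat) : Int) ∣ 40) :
    pvScore ((PySem.List.enumerate answers 0).foldl
      (fun d ia => d.insert (PySem.Int.mod ia.1 40, ia.2)
                            (d.getD (PySem.Int.mod ia.1 40, ia.2) 0 + 1))
      PySem.Dict.empty) p
    = ((PySem.List.enumerate answers 0).countP
        (fun ia => ia.2 == PySem.List.pyGetD p (PySem.Int.mod ia.1 (p.length : Int)) 0) : Int) := by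
  have hfold : (PySem.List.enumerate answers 0).foldl
      (fun d ia => d.insert (PySem.Int.mod ia.1 40, ia.2)
                            (d.getD (PySem.Int.mod ia.1 40, ia.2) 0 + 1))
      PySem.Dict.empty
      = PySem.Dict.counter ((PySem.List.enumerate answers 0).map
          (fun ia => (PySem.Int.mod ia.1 40, ia.2))) := by
    rw [← PySem.Dict.foldl_insert_getD_add_one_eq_counter, List.foldl_map]
  rw [hfold]
  unfold pvScore
  have hget : ∀ r : Int,
      (PySem.Dict.counter ((PySem.List.enumerate answers 0).map
          (fun ia => (PySem.Int.mod ia.1 40, ia.2)))).getD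
        (r, PySem.List.pyGetD p (PySem.Int.mod r (p.length : Int)) 0) 0
      = ((List.count (r, PySem.List.pyGetD p (PySem.Int.mod r (p.length : Int)) 0)
          ((PySem.List.enumerate answers 0).map (fun ia => (PySem.Int.mod ia.1 40, ia.2))) : Nat) : Int) := by
    intro r; rw [PySem.Dict.getD_counter]
  simp only [hget]
  rw [pv_sum_count (fun r => PySem.List.pyGetD p (PySem.Int.mod r (p.length : Int)) 0)
      _ (by
        intro x hx
        simp only [List.mem_map] at hx
        obtain ⟨ia, _, rfl⟩ := hx
        exact ⟨PySem.Int.mod_nonneg _ (by omega), PySem.Int.mod_lt _ (by omega)⟩)]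
  rw [List.countP_map]
  apply congrArg
  apply List.countP_congr
  intro ia _
  simp only [Function.comp]
  rw [pv_mod_mod ia.1 (p.length : Int) (by exact_mod_cast hL) hd]

-- A's triple-counter fold splits into three independent counting folds
theorem pv_foldl_prod3 (l : List Int) (f g h : Int → Bool) :
    l.foldl (fun a i =>
      ((if f i then a.1 + 1 else a.1),
       (if g i then a.2.1 + 1 else a.2.1),
       (if h i then a.2.2 + 1 else a.2.2))) ((0:Int), (0:Int), (0:Int))
    = (l.foldl (fun a i => if f i then a + 1 else a) 0,
       l.foldl (fun a i => if g i then a + 1 else a) 0,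
       l.foldl (fun a i => if h i then a + 1 else a) 0) := by
  rw [PySem.List.foldl_prod_mk (fun s e => if f e then s + 1 else s)
        (fun s e => (if g e then s.1 + 1 else s.1, if h e then s.2 + 1 else s.2)),
      PySem.List.foldl_prod_mk (fun s e => if g e then s + 1 else s)
        (fun s e => if h e then s + 1 else s)]

-- A's index-loop count equals the enumerate-based count B's score reduces to
theorem pv_countA (answers p : List Int) :
    (List.countP
        (fun i => PySem.List.pyGetD p (PySem.Int.mod i (p.length : Int)) 0 == PySem.List.pyGetD answers i 0)
        (PySem.List.pyRange 0 (answers.length : Int) 1) : Int)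
    = ((PySem.List.enumerate answers 0).countP
        (fun ia => ia.2 == PySem.List.pyGetD p (PySem.Int.mod ia.1 (p.length : Int)) 0) : Int) := by
  rw [PySem.List.enumerate_eq_map_pyRange answers 0, List.countP_map]
  simp only [PySem.List.len_eq]
  apply congrArg
  apply List.countP_congr
  intro i _
  simp only [Function.comp_apply]
  rw [pv_beq_comm]

-- ===== VERDICT (by name: the statement is the Claim_ definition above) =====
theorem solution_spec : Claim_equal_solution := by
  unfold Claim_equal_solution Spec_solution
  intro answers _
  unfold solution solution_alt
  simp only []
  rw [pv_foldl_prod3]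
  simp only [PySem.List.foldl_if_add_one, zero_add]
  rw [pv_countA answers [1, 2, 3, 4, 5], pv_countA answers [2, 1, 2, 3, 2, 4, 2, 5],
      pv_countA answers [3, 3, 1, 1, 2, 2, 4, 4, 5, 5]]
  simp only [List.map]
  rw [pv_score_eq answers [1, 2, 3, 4, 5] (by decide) (by decide),
      pv_score_eq answers [2, 1, 2, 3, 2, 4, 2, 5] (by decide) (by decide),
      pv_score_eq answers [3, 3, 1, 1, 2, 2, 4, 4, 5, 5] (by decide) (by decide)]
  set s1 := ((PySem.List.enumerate answers 0).countP
      (fun ia => ia.2 == PySem.List.pyGetD [1, 2, 3, 4, 5] (PySem.Int.mod ia.1 (([1, 2, 3, 4, 5] : List Int).length : Int)) 0) : Int) with hs1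
  set s2 := ((PySem.List.enumerate answers 0).countP
      (fun ia => ia.2 == PySem.List.pyGetD [2, 1, 2, 3, 2, 4, 2, 5] (PySem.Int.mod ia.1 (([2, 1, 2, 3, 2, 4, 2, 5] : List Int).length : Int)) 0) : Int) with hs2
  set s3 := ((PySem.List.enumerate answers 0).countP
      (fun ia => ia.2 == PySem.List.pyGetD [3, 3, 1, 1, 2, 2, 4, 4, 5, 5] (PySem.Int.mod ia.1 (([3, 3, 1, 1, 2, 2, 4, 4, 5, 5] : List Int).length : Int)) 0) : Int) with hs3
  set m := (PySem.List.max? [s1, s2, s3] (fun y => y)).getD 0 with hm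
  have hlen : ((([s1, s2, s3] : List Int).length : Nat) : Int) = 3 := by simp
  rw [hlen]
  have hrange : PySem.List.pyRange 0 (3 : Int) 1 = [0, 1, 2] := by decide
  rw [hrange]
  have e0 : PySem.List.pyGetD ([s1, s2, s3] : List Int) 0 0 = s1 := by
    simp [PySem.List.pyGetD, PySem.List.pyGet?, PySem.List.pyIdx?]
  have e1 : PySem.List.pyGetD ([s1, s2, s3] : List Int) 1 0 = s2 := by
    simp [PySem.List.pyGetD, PySem.List.pyGet?, PySem.List.pyIdx?]
  have e2 : PySem.List.pyGetD ([s1, s2, s3] : List Int) 2 0 = s3 := by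
    simp [PySem.List.pyGetD, PySem.List.pyGet?, PySem.List.pyIdx?]
  simp only [List.foldl_cons, List.foldl_nil, e0, e1, e2,
    PySem.List.enumerate_cons, PySem.List.enumerate_nil,
    List.filter_cons, List.filter_nil]
  have hms : ∀ x : Int, (m == x) = (x == m) := by
    intro x
    by_cases h : m = x
    · simp [h]
    · have h' : ¬ x = m := fun hx => h hx.symm
      simp [h, h']
  rw [hms s1, hms s2, hms s3]
  by_cases h1 : s1 == m <;> by_cases h2 : s2 == m <;> by_cases h3 : s3 == m <;>
      simp [h1, h2, h3] <;> try decide
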